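-- pv_equiv track=rewrite | github.com/NikhilSharma972/translatesharetribe | second.py | build_value
-- ===== SOURCE A (Python) =====
-- def build_value(v):
--     st = ""
--     wordss = v.split(" ")
--     for word in wordss:
--         if '%{' in word:
--             st = st + "@@@@@@" + " "
--         else:
--             st = st + word + " "
--     st = st.replace('"',r"'")
--     return st
-- ===== SOURCE B (Python) =====
-- def build_value(v):
--     # single character-level pass: no split(), no per-word substring scan
--     parts = []
--     word = ""
--     has = False
--     prev = None
--     for c in v:
--         if c == ' ':
--             parts.append('@@@@@@' if has else word)
--             word, has, prev = "", False, None
--         else: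
--             word += "'" if c == '"' else c
--             if prev == '%' and c == '{':
--                 has = True
--             prev = c
--     parts.append('@@@@@@' if has else word)
--     return ' '.join(parts) + ' '
-- ===== Notes on version B (the rewrite author's own statement) =====
-- stated objective: alternative
-- what changed: A splits on spaces and scans each word with a substring search before concatenating and doing a final quote replacement; B makes one character-level pass over the string, assembling words, detecting the interpolation marker pair by remembering the previous character, and swapping quotes inline.
import Mathlib
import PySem

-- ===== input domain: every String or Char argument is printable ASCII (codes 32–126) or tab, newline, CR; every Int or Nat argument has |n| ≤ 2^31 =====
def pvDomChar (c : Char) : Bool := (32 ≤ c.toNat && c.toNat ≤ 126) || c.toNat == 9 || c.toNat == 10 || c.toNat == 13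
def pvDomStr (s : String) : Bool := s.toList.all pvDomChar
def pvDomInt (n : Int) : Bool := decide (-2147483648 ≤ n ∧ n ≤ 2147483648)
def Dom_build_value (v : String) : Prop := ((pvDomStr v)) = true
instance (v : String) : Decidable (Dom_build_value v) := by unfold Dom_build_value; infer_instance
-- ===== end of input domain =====

-- B replaces A's split-then-scan-each-word loop with a single character-level pass (streaming word assembly with inline '%{'-pair detection and quote swap); objective: alternative structure, same cost.

-- ===== PORT A =====
def build_value (v : String) : String :=
  let wordss := (PySem.Chars.splitOn v.toList [' ']).map String.ofList
  let st := wordss.foldl (fun st word =>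
    if PySem.Str.isIn "%{" word then st ++ "@@@@@@" ++ " "
    else st ++ word ++ " ") ""
  PySem.Str.replace st "\"" "'"

-- ===== PORT B =====
def bvQsub (c : Char) : Char := if c = '"' then '\'' else c

def bvStep (s : List String × String × Bool × Option Char) (c : Char) :
    List String × String × Bool × Option Char :=
  let (parts, word, has, prev) := s
  if c = ' ' then
    (parts ++ [if has then "@@@@@@" else word], "", false, none)
  else
    (parts, word.push (bvQsub c),
     if prev == some '%' && c == '{' then true else has, some c)

def build_value_alt (v : String) : String :=
  let r := v.toList.foldl bvStep ([], "", false, none)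
  PySem.Str.join " " (r.1 ++ [if r.2.2.1 then "@@@@@@" else r.2.1]) ++ " "

-- ===== PRECONDITION & SPEC =====
def Spec_build_value (v : String) (out : String) : Prop := out = build_value_alt v
instance (v : String) (out : String) : Decidable (Spec_build_value v out) := by unfold Spec_build_value; infer_instance

-- ===== CLAIM (what is proved, stated in full; the proofs are below) =====
def Claim_equal_build_value : Prop := ∀ (v : String), Dom_build_value v → Spec_build_value v (build_value v)

-- ===== LEMMAS AND PROOFS =====

-- split on a single space, as a plain structural recursion
def splitSp : List Char → List (List Char)
  | [] => [[]]
  | c :: t =>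
    if c = ' ' then [] :: splitSp t
    else match splitSp t with
      | [] => [[c]]
      | w :: ws => (c :: w) :: ws

-- does scanning these chars (with the given previous char) ever see '%' directly followed by '{'
def tokHas : Option Char → List Char → Bool
  | _, [] => false
  | prev, c :: t => (prev == some '%' && c == '{') || tokHas (some c) t

def atSent : List Char := ['@','@','@','@','@','@']

def mapTok (w : List Char) : List Char :=
  if tokHas none w then atSent else w.map bvQsub

def flatSp (ws : List (List Char)) : List Char := ws.flatMap (fun w => w ++ [' '])

lemma tokHas_nil (p : Option Char) : tokHas p [] = false := rfl

lemma splitSp_ne_nil (l : List Char) : splitSp l ≠ [] := by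
  cases l with
  | nil => simp [splitSp]
  | cons c t =>
    simp only [splitSp]
    split <;> [simp; split <;> simp]

lemma splitOn_go_space (l : List Char) : ∀ (fuel : Nat) (cur : List Char) (acc : List (List Char)),
    l.length ≤ fuel →
    PySem.Chars.splitOn.go [' '] fuel l cur acc
      = acc.reverse ++ (match splitSp l with
          | [] => [cur.reverse]
          | w :: ws => (cur.reverse ++ w) :: ws) := by
  induction l with
  | nil =>
    intro fuel cur acc _
    cases fuel <;> simp [PySem.Chars.splitOn.go, splitSp]
  | cons c t ih =>
    intro fuel cur acc hf
    cases fuel with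
    | zero => simp at hf
    | succ f =>
      simp only [PySem.Chars.splitOn.go]
      by_cases hc : c = ' '
      · subst hc
        rw [if_pos (by simp [List.isPrefixOf])]
        simp only [List.length_singleton, List.drop_succ_cons, List.drop_zero]
        rw [ih f [] (cur.reverse :: acc) (by simpa using hf)]
        obtain ⟨w, ws, hw⟩ : ∃ w ws, splitSp t = w :: ws := by
          rcases h : splitSp t with _ | ⟨w, ws⟩
          · exact absurd h (splitSp_ne_nil t)
          · exact ⟨_, _, rfl⟩
        simp [splitSp, hw]
      · rw [if_neg (by simp [List.isPrefixOf]; intro h; exact hc h.symm)]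
        rw [ih f (c :: cur) acc (by simpa using hf)]
        obtain ⟨w, ws, hw⟩ : ∃ w ws, splitSp t = w :: ws := by
          rcases h : splitSp t with _ | ⟨w, ws⟩
          · exact absurd h (splitSp_ne_nil t)
          · exact ⟨_, _, rfl⟩
        simp [splitSp, hw, hc]

lemma splitOn_space (l : List Char) : PySem.Chars.splitOn l [' '] = splitSp l := by
  rw [PySem.Chars.splitOn, splitOn_go_space l _ [] [] (by omega)]
  rcases h : splitSp l with _ | ⟨w, ws⟩
  · exact absurd h (splitSp_ne_nil l)
  · simp

lemma replace_go_quote (l : List Char) : ∀ (fuel : Nat) (acc : List Char),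
    l.length ≤ fuel →
    PySem.Chars.replace.go ['"'] ['\''] fuel l acc = acc.reverse ++ l.map bvQsub := by
  induction l with
  | nil => intro fuel acc _; cases fuel <;> simp [PySem.Chars.replace.go]
  | cons c t ih =>
    intro fuel acc hf
    cases fuel with
    | zero => simp at hf
    | succ f =>
      simp only [PySem.Chars.replace.go]
      by_cases hc : c = '"'
      · subst hc
        rw [if_pos (by simp [List.isPrefixOf])]
        simp only [List.length_singleton, List.drop_succ_cons, List.drop_zero]
        rw [ih f _ (by simpa using hf)]
        simp [bvQsub]
      · rw [if_neg (by simp [List.isPrefixOf]; intro h; exact hc h.symm)]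
        rw [ih f _ (by simpa using hf)]
        simp [bvQsub, hc]

lemma replace_quote (l : List Char) : PySem.Chars.replace l ['"'] ['\''] = l.map bvQsub := by
  rw [PySem.Chars.replace]
  rw [if_neg (by simp)]
  exact replace_go_quote l l.length [] (le_refl _)

lemma tokHas_some_iff (w : List Char) : ∀ p, tokHas (some p) w = true ↔ ['%','{'] <:+: (p :: w) := by
  induction w with
  | nil => intro p; simp [tokHas, List.infix_cons_iff, List.IsPrefix]
  | cons c t ih =>
    intro p
    simp only [tokHas, Bool.or_eq_true, Bool.and_eq_true, beq_iff_eq, Option.some.injEq, ih c]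
    rw [List.infix_cons_iff (l₂ := c :: t)]
    constructor
    · rintro (⟨h1, h2⟩ | h)
      · exact Or.inl (by simp [h1, h2, List.cons_prefix_cons])
      · exact Or.inr h
    · rintro (h | h)
      · rw [List.cons_prefix_cons] at h
        rcases h with ⟨h1, h2⟩
        rw [List.cons_prefix_cons] at h2
        exact Or.inl ⟨h1.symm, h2.1.symm⟩
      · exact Or.inr h

lemma tokHas_eq_isIn (w : List Char) : tokHas none w = PySem.Chars.isIn ['%','{'] w := by
  have key : tokHas none w = true ↔ ['%','{'] <:+: w := by
    cases w with
    | nil => simp [tokHas, List.infix_iff_prefix_suffix]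
    | cons c t =>
      have : tokHas none (c :: t) = tokHas (some c) t := by simp [tokHas]
      rw [this, tokHas_some_iff]
  cases hi : PySem.Chars.isIn ['%','{'] w with
  | true => rw [PySem.Chars.isIn_iff_infix] at hi; simp [key, hi]
  | false =>
    rw [PySem.Chars.isIn_eq_false_iff] at hi
    simp only [Bool.eq_false_iff]
    intro h
    exact hi (key.mp h)

lemma join_flatSp (ws : List (List Char)) (h : ws ≠ []) :
    PySem.Chars.join [' '] ws ++ [' '] = flatSp ws := by
  induction ws with
  | nil => simp at h
  | cons x xs ih =>
    cases xs with
    | nil => simp [PySem.Chars.join_singleton, flatSp]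
    | cons y ys =>
      rw [PySem.Chars.join_cons_cons]
      have := ih (by simp)
      simp only [flatSp, List.flatMap_cons] at this ⊢
      rw [List.append_assoc, List.append_assoc, this]
      simp

lemma foldA (ws : List String) : ∀ (init : String),
    (ws.foldl (fun st word =>
      if PySem.Str.isIn "%{" word then st ++ "@@@@@@" ++ " "
      else st ++ word ++ " ") init).toList
    = init.toList ++ flatSp (ws.map (fun w =>
        if PySem.Chars.isIn ['%','{'] w.toList then atSent else w.toList)) := by
  induction ws with
  | nil => intro init; simp [flatSp]
  | cons w t ih =>
    intro init
    simp only [List.foldl_cons, List.map_cons, flatSp, List.flatMap_cons]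
    rw [ih]
    by_cases h : PySem.Chars.isIn ['%','{'] w.toList = true
    · rw [if_pos (by simpa [PySem.Str.isIn_eq] using h), if_pos h]
      simp [flatSp, atSent]
    · rw [if_neg (by simpa [PySem.Str.isIn_eq] using h), if_neg h]
      simp [flatSp]

lemma foldB (l : List Char) : ∀ (parts : List String) (word : String) (has : Bool) (prev : Option Char),
    (let r := l.foldl bvStep (parts, word, has, prev)
     r.1.map String.toList ++ [(if r.2.2.1 then "@@@@@@" else r.2.1).toList])
    = parts.map String.toList ++
       (match splitSp l with
        | [] => []
        | x :: xs => (if has || tokHas prev x then atSent else word.toList ++ x.map bvQsub) :: xs.map mapTok) := by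
  induction l with
  | nil =>
    intro parts word has prev
    simp only [List.foldl_nil, splitSp, tokHas, Bool.or_false, List.map_nil, List.append_nil]
    cases has <;> simp [atSent]
  | cons c t ih =>
    intro parts word has prev
    obtain ⟨x, xs, hx⟩ : ∃ x xs, splitSp t = x :: xs := by
      rcases h : splitSp t with _ | ⟨x, xs⟩
      · exact absurd h (splitSp_ne_nil t)
      · exact ⟨_, _, rfl⟩
    simp only [List.foldl_cons]
    by_cases hc : c = ' '
    · subst hc
      rw [show bvStep (parts, word, has, prev) ' '
            = (parts ++ [if has then "@@@@@@" else word], "", false, none) from by simp [bvStep]]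
      rw [ih]
      simp only [splitSp, hx, List.map_append, List.map_cons, List.map_nil, List.append_assoc]
      cases has <;> simp [atSent, tokHas_nil, mapTok]
    · rw [show bvStep (parts, word, has, prev) c
            = (parts, word.push (bvQsub c),
               if prev == some '%' && c == '{' then true else has, some c) from by simp [bvStep, hc]]
      rw [ih]
      simp only [splitSp, hc, hx]
      congr 2
      have hb : (if (prev == some '%' && c == '{') = true then true else has)
          = (has || (prev == some '%' && c == '{')) := by
        cases (prev == some '%' && c == '{') <;> cases has <;> rfl
      rw [hb]
      simp only [tokHas, String.toList_push, Bool.or_assoc, List.map_cons, List.append_assoc,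
        List.singleton_append]

lemma toList_A (v : String) :
    (build_value v).toList = flatSp ((splitSp v.toList).map mapTok) := by
  simp only [build_value, PySem.Str.toList_replace,
    show ("\"" : String).toList = ['"'] from rfl, show ("'" : String).toList = ['\''] from rfl]
  rw [foldA, replace_quote]
  simp only [String.toList_empty, List.nil_append, List.map_map]
  rw [splitOn_space]
  simp only [flatSp, List.map_flatMap, List.flatMap_map]
  congr 1
  funext w
  simp only [Function.comp_apply, String.toList_ofList, List.map_append, mapTok,
    ← tokHas_eq_isIn]
  cases h : tokHas none w <;> simp [bvQsub, atSent]

lemma toList_B (v : String) :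
    (build_value_alt v).toList = flatSp ((splitSp v.toList).map mapTok) := by
  simp only [build_value_alt, String.toList_append, PySem.Str.toList_join]
  have hB := foldB v.toList [] "" false none
  simp only [List.map_nil, List.nil_append, String.toList_empty] at hB
  obtain ⟨x, xs, hx⟩ : ∃ x xs, splitSp v.toList = x :: xs := by
    rcases h : splitSp v.toList with _ | ⟨x, xs⟩
    · exact absurd h (splitSp_ne_nil v.toList)
    · exact ⟨_, _, rfl⟩
  rw [hx] at hB
  simp only [Bool.false_or] at hB
  rw [List.map_append]
  simp only [List.map_cons, List.map_nil]
  rw [hB]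
  have : (if tokHas none x then atSent else x.map bvQsub) :: xs.map mapTok
       = (x :: xs).map mapTok := by simp [mapTok]
  rw [this, hx, show (" " : String).toList = [' '] from rfl]
  exact join_flatSp _ (by simp)

-- ===== VERDICT (by name: the statement is the Claim_ definition above) =====
theorem build_value_spec : Claim_equal_build_value := by
  intro v _
  unfold Spec_build_value
  have h : (build_value v).toList = (build_value_alt v).toList := by
    rw [toList_A, toList_B]
  calc build_value v = String.ofList (build_value v).toList := (String.ofList_toList (s := build_value v)).symm
    _ = String.ofList (build_value_alt v).toList := by rw [h]
    _ = build_value_alt v := String.ofList_toList
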